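-- pv_equiv track=rewrite | github.com/aidencullo/leetcode | 401/solution.py | readMinutes
-- ===== SOURCE A (Python) =====
-- from typing import List
--
-- from itertools import combinations, permutations
--
-- def readMinutes(turnedOn: int) -> List[str]:
--     minutes = [1, 2, 4, 8, 16, 32]
--     res = []
--     for c in combinations(minutes, turnedOn):
--         total = sum(c)
--         if total < 60:
--             res.append(str(total))
--     return res
-- ===== SOURCE B (Python) =====
-- def readMinutes(turnedOn):
--     minutes = [1, 2, 4, 8, 16, 32]
--     res = []
--     def rec(start, total, count):
--         if count == turnedOn:
--             if total < 60:
--                 res.append(str(total))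
--             return
--         for i in range(start, 6):
--             rec(i + 1, total + minutes[i], count + 1)
--     rec(0, 0, 0)
--     return res
-- ===== Notes on version B (the rewrite author's own statement) =====
-- stated objective: alternative
-- what changed: Replaces itertools.combinations over the LED values with a hand-written recursive backtracking generator over minute indices that carries the running sum, emitting subsets in the same index-lexicographic order; for turnedOn > 6 combinations still allocates an index array of size turnedOn while the recursion's work stays bounded by the 6 LEDs.
-- outside the precondition, e.g. on readMinutes(-1): A raises ValueError, B returns []
import Mathlib
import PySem

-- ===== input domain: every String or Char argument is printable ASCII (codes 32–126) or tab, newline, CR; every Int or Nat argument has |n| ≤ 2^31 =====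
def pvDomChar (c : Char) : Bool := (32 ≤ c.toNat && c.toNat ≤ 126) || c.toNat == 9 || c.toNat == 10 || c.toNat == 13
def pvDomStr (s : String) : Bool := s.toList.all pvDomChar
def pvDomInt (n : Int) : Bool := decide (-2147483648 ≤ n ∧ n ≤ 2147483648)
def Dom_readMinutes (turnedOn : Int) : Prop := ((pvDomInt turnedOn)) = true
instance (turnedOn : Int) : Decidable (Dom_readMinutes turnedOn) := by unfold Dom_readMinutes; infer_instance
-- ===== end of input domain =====

-- B replaces itertools.combinations with recursive backtracking over minute indices
-- (same index-lexicographic output order); equivalence is proved for turnedOn ≥ 0.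

-- ===== PORT A =====
-- itertools.combinations(xs, k) in its index-lexicographic order
def pvCombos (xs : List Int) (k : Nat) : List (List Int) :=
  match k, xs with
  | 0, _ => [[]]
  | _ + 1, [] => []
  | k + 1, x :: rest => (pvCombos rest k).map (x :: ·) ++ pvCombos rest (k + 1)

def readMinutes (turnedOn : Int) : List String :=
  let minutes : List Int := [1, 2, 4, 8, 16, 32]
  (pvCombos minutes turnedOn.toNat).foldl
    (fun res c =>
      let total := c.sum
      if total < 60 then res ++ [PySem.Int.toStr total] else res) []

-- ===== PORT B =====
-- rec(start, total, count) of Source B; the remaining suffix of `minutes` stands for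
-- the index range [start, 6); the second recursive call is the rest of the for-loop.
def recAlt (turnedOn : Int) : List Int → Int → Int → List String
  | [], total, count =>
    if count = turnedOn then (if total < 60 then [PySem.Int.toStr total] else []) else []
  | x :: xs, total, count =>
    if count = turnedOn then (if total < 60 then [PySem.Int.toStr total] else [])
    else recAlt turnedOn xs (total + x) (count + 1) ++ recAlt turnedOn xs total count

def readMinutes_alt (turnedOn : Int) : List String :=
  recAlt turnedOn [1, 2, 4, 8, 16, 32] 0 0

-- ===== PRECONDITION & SPEC =====
-- Pre_ excludes turnedOn < 0, on which Python A raises ValueError (combinations rejects negative r).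
def Pre_readMinutes (turnedOn : Int) : Prop := 0 ≤ turnedOn
instance (turnedOn : Int) : Decidable (Pre_readMinutes turnedOn) := by unfold Pre_readMinutes; infer_instance
def pvWitness_readMinutes : Int := 2

def Spec_readMinutes (turnedOn : Int) (out : List String) : Prop := out = readMinutes_alt turnedOn
instance (turnedOn : Int) (out : List String) : Decidable (Spec_readMinutes turnedOn out) := by unfold Spec_readMinutes; infer_instance

-- ===== CLAIM (what is proved, stated in full; the proofs are below) =====
def Claim_equal_readMinutes : Prop := ∀ (turnedOn : Int), Dom_readMinutes turnedOn → Pre_readMinutes turnedOn → Spec_readMinutes turnedOn (readMinutes turnedOn)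

-- ===== LEMMAS AND PROOFS =====
lemma pvCombos_nil (xs : List Int) : ∀ k : Nat, xs.length < k → pvCombos xs k = [] := by
  induction xs with
  | nil => intro k hk; cases k with
    | zero => omega
    | succ k => rfl
  | cons x rest ih =>
    intro k hk
    cases k with
    | zero => omega
    | succ k =>
      simp only [pvCombos]
      rw [ih k (by simpa using hk), ih (k + 1) (by simp at hk ⊢; omega)]
      simp

lemma recAlt_nil (t : Int) : ∀ (rem : List Int) (total count : Int),
    count + rem.length < t → recAlt t rem total count = [] := by
  intro rem
  induction rem with
  | nil =>
    intro total count h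
    simp only [recAlt]
    simp at h
    rw [if_neg (by omega)]
  | cons x xs ih =>
    intro total count h
    simp only [recAlt]
    rw [if_neg (by simp at h; omega)]
    rw [ih (total + x) (count + 1) (by simp at h ⊢; omega),
        ih total count (by simp at h ⊢; omega)]
    rfl

-- ===== VERDICT (by name: the statement is the Claim_ definition above) =====
theorem readMinutes_spec : Claim_equal_readMinutes := by
  intro t _ hpre
  unfold Spec_readMinutes
  by_cases hle : t ≤ 6
  · unfold Pre_readMinutes at hpre
    interval_cases t <;> decide
  · rw [not_le] at hle
    have h1 : pvCombos [1, 2, 4, 8, 16, 32] t.toNat = [] :=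
      pvCombos_nil _ _ (by simp only [List.length_cons, List.length_nil]; omega)
    have h2 : recAlt t [1, 2, 4, 8, 16, 32] 0 0 = [] :=
      recAlt_nil t _ 0 0 (by simp only [List.length_cons, List.length_nil]; push_cast; omega)
    simp [readMinutes, readMinutes_alt, h1, h2]
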